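-- pv_equiv track=rewrite | github.com/williamdarkocode/AlgortithmsAndDataStructures | Python_Algos_Datastructstures/hudson_trading_exercisept1.py | solution
-- ===== SOURCE A (Python) =====
-- def find_gcd(smallest, largest):
--     if smallest == 0:
--         return largest
--     return find_gcd(largest % smallest, smallest)
--
-- def solution(X, Y):
--     freqs = {}
--     for i in range(len(X)):
--         num = X[i]
--         denom = Y[i]
--         gcd = find_gcd(min(num, denom), max(num, denom))
--
--         num//=gcd
--         denom//=gcd
--         frac = f'{num}/{denom}'
--
--         if frac not in freqs:
--             freqs[frac] = 0
--         freqs[frac]+=1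
--
--     return max(freqs.values())
-- ===== SOURCE B (Python) =====
-- def solution(X, Y):
--     # Reduce each fraction to lowest terms with an ordered iterative Euclid,
--     # sort the reduced pairs, and return the longest run of equal neighbours.
--     pairs = []
--     for x, y in zip(X, Y):
--         a, b = min(x, y), max(x, y)
--         while a:
--             a, b = b % a, a
--         pairs.append((x // b, y // b))
--     pairs.sort()
--     best = 0
--     run = 0
--     prev = None
--     for t in pairs:
--         run = run + 1 if t == prev else 1
--         prev = t
--         if run > best:
--             best = run
--     return best
-- ===== Notes on version B (the rewrite author's own statement) =====
-- stated objective: alternative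
-- what changed: Replaces the recursive Euclid plus string-keyed dict counter with an ordered iterative Euclid, reduction to integer pairs, a sort of the reduced pairs and a single scan for the longest run of equal neighbours.
import Mathlib
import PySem

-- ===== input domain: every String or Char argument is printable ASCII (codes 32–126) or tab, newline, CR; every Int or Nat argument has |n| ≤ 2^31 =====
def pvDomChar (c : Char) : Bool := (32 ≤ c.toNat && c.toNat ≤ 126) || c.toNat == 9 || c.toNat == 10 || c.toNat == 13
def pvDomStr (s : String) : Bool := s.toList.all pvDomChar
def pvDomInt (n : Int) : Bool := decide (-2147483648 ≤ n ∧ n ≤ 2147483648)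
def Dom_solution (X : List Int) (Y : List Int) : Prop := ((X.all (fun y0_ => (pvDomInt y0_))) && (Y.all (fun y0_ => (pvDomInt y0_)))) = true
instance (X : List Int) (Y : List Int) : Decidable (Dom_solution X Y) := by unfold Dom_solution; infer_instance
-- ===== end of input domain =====

-- B replaces A's recursive Euclid + string-keyed dict counter by an ordered iterative
-- Euclid, reduction to integer pairs, sorting the reduced pairs and scanning for the
-- longest run of equal neighbours (objective: alternative algorithm of similar cost).

-- ===== PORT A =====
-- the fuel only makes the recursion structural; it is never exhausted (|smallest| shrinks)
def findGcdFuel : Nat → Int → Int → Int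
  | 0, _, largest => largest
  | f + 1, smallest, largest =>
      if smallest = 0 then largest
      else findGcdFuel f (PySem.Int.mod largest smallest) smallest

def findGcd (smallest largest : Int) : Int :=
  findGcdFuel (smallest.natAbs + 1) smallest largest

def solution (X : List Int) (Y : List Int) : Int :=
  let freqs : PySem.Dict String Int :=
    (PySem.List.pyRange 0 (X.length : Int) 1).foldl (fun d i =>
      let num := PySem.List.pyGetD X i 0
      let denom := PySem.List.pyGetD Y i 0
      let gcd := findGcd (min num denom) (max num denom)
      let num2 := PySem.Int.floordiv num gcd
      let denom2 := PySem.Int.floordiv denom gcd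
      let frac := PySem.Int.toStr num2 ++ "/" ++ PySem.Int.toStr denom2
      let d1 := if d.contains frac then d else d.insert frac 0
      d1.insert frac (d1.getD frac 0 + 1)) PySem.Dict.empty
  match PySem.List.max? freqs.values (fun v => v) with
  | some m => m
  | none => 0    -- unreachable under Pre_ (Python: max() of an empty dict raises ValueError)

-- ===== PORT B =====
-- Source B's inner while loop: a, b = min(x, y), max(x, y); while a: a, b = b % a, a
-- (the fuel only makes the loop structural; it is never exhausted: |a| shrinks)
def pvEuclidFuel : Nat → Int → Int → Int
  | 0, _, b => b
  | f + 1, a, b => if a = 0 then b else pvEuclidFuel f (PySem.Int.mod b a) a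

def pvEuclid (a : Int) (b : Int) : Int := pvEuclidFuel (a.natAbs + 1) a b

-- Source B's loop body: the reduced pair appended for one (x, y)
def pvReduce (x : Int) (y : Int) : Int × Int :=
  let b := pvEuclid (min x y) (max x y)
  (PySem.Int.floordiv x b, PySem.Int.floordiv y b)

-- Source B's run scan step over the sorted list
def pvScanStep (st : Int × Int × Option (Int × Int)) (p : Int × Int) :
    Int × Int × Option (Int × Int) :=
  let run' := if some p = st.2.2 then st.2.1 + 1 else 1
  let best' := if run' > st.1 then run' else st.1
  (best', run', some p)

def solution_alt (X : List Int) (Y : List Int) : Int :=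
  let pairs := (X.zip Y).map (fun q => pvReduce q.1 q.2)
  let sp := PySem.List.sorted2 pairs (fun p => p.1) (fun p => p.2)
  (sp.foldl pvScanStep (0, 0, none)).1

-- ===== PRECONDITION & SPEC =====
-- Pre_ excludes exactly the inputs where the Python A raises: empty X (ValueError from
-- max()), Y shorter than X (IndexError), and a position where both X[i] and Y[i] are 0
-- (ZeroDivisionError after find_gcd returns 0).
def Pre_solution (X : List Int) (Y : List Int) : Prop :=
  X ≠ [] ∧ X.length ≤ Y.length ∧ ∀ p ∈ X.zip Y, ¬(p.1 = 0 ∧ p.2 = 0)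
instance (X : List Int) (Y : List Int) : Decidable (Pre_solution X Y) := by
  unfold Pre_solution; infer_instance

def pvWitness_solution : List Int × List Int := ([2, 1, -2], [4, 2, 4])

def Spec_solution (X : List Int) (Y : List Int) (out : Int) : Prop := out = solution_alt X Y
instance (X : List Int) (Y : List Int) (out : Int) : Decidable (Spec_solution X Y out) := by
  unfold Spec_solution; infer_instance

-- ===== CLAIM (what is proved, stated in full; the proofs are below) =====
def Claim_equal_solution : Prop := ∀ (X : List Int) (Y : List Int), Dom_solution X Y → Pre_solution X Y → Spec_solution X Y (solution X Y)

-- ===== LEMMAS AND PROOFS =====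
-- the two ports' Euclid loops are the same recursion
theorem fuel_eq : ∀ (f : Nat) (a b : Int), pvEuclidFuel f a b = findGcdFuel f a b := by
  intro f
  induction f with
  | zero => intro a b; rfl
  | succ f ih =>
    intro a b
    simp only [pvEuclidFuel, findGcdFuel, ih]

theorem euclid_eq_findGcd (a b : Int) : pvEuclid a b = findGcd a b := by
  unfold pvEuclid findGcd
  exact fuel_eq _ a b

theorem reduce_agree (x y : Int) :
    (PySem.Int.floordiv x (findGcd (min x y) (max x y)),
     PySem.Int.floordiv y (findGcd (min x y) (max x y))) = pvReduce x y := by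
  simp only [pvReduce, euclid_eq_findGcd]

theorem toDigitsCore_spec : ∀ (f n : Nat) (l : List Char), n < f →
    Nat.toDigitsCore 10 f n l =
      (if n = 0 then ['0'] else ((Nat.digits 10 n).map Nat.digitChar).reverse) ++ l := by
  intro f
  induction f with
  | zero => intro n l h; omega
  | succ f ih =>
    intro n l h
    rw [Nat.toDigitsCore]
    by_cases h0 : n / 10 = 0
    · have hn10 : n < 10 := by omega
      rw [if_pos h0]
      by_cases hz : n = 0
      · subst hz; simp; decide
      · rw [if_neg hz]
        rw [Nat.digits_def' (by norm_num : (1:Nat) < 10) (Nat.pos_of_ne_zero hz), h0]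
        simp [Nat.mod_eq_of_lt hn10]
    · rw [if_neg h0]
      have hnz : n ≠ 0 := by omega
      have hlt : n / 10 < f := by
        have := Nat.div_lt_self (Nat.pos_of_ne_zero hnz) (by norm_num : (1:Nat) < 10)
        omega
      rw [ih (n / 10) (Nat.digitChar (n % 10) :: l) hlt]
      rw [if_neg h0, if_neg hnz]
      rw [Nat.digits_def' (by norm_num : (1:Nat) < 10) (Nat.pos_of_ne_zero hnz)]
      simp

theorem toDigits_spec (n : Nat) : Nat.toDigits 10 n =
    (if n = 0 then ['0'] else ((Nat.digits 10 n).map Nat.digitChar).reverse) := by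
  have := toDigitsCore_spec (n + 1) n [] (by omega)
  simpa [Nat.toDigits] using this

theorem mem_toDigits_digit {c : Char} {n : Nat} (h : c ∈ Nat.toDigits 10 n) :
    c ∈ ['0','1','2','3','4','5','6','7','8','9'] := by
  rw [toDigits_spec] at h
  by_cases hz : n = 0
  · rw [if_pos hz] at h; simp at h; simp [h]
  · rw [if_neg hz] at h
    simp only [List.mem_reverse, List.mem_map] at h
    obtain ⟨d, hd, rfl⟩ := h
    have hlt : d < 10 := Nat.digits_lt_base (by norm_num) hd
    have : ∀ d : Nat, d < 10 → Nat.digitChar d ∈ ['0','1','2','3','4','5','6','7','8','9'] := by decide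
    exact this d hlt

theorem map_digitChar_inj : ∀ (l1 l2 : List Nat), (∀ x ∈ l1, x < 10) → (∀ x ∈ l2, x < 10) →
    l1.map Nat.digitChar = l2.map Nat.digitChar → l1 = l2 := by
  intro l1
  induction l1 with
  | nil => intro l2 _ _ h; cases l2 <;> simp_all
  | cons a t ih =>
    intro l2 h1 h2 h
    cases l2 with
    | nil => simp at h
    | cons b t2 =>
      simp only [List.map_cons, List.cons.injEq] at h
      have hd : ∀ a : Nat, a < 10 → ∀ b : Nat, b < 10 → Nat.digitChar a = Nat.digitChar b → a = b := by decide
      have ha := h1 a (by simp)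
      have hb := h2 b (by simp)
      have := hd a ha b hb h.1
      subst this
      rw [ih t2 (fun x hx => h1 x (by simp [hx])) (fun x hx => h2 x (by simp [hx])) h.2]

theorem toDigits_inj {m n : Nat} (h : Nat.toDigits 10 m = Nat.toDigits 10 n) : m = n := by
  rw [toDigits_spec, toDigits_spec] at h
  by_cases hm : m = 0 <;> by_cases hn : n = 0
  · omega
  · rw [if_pos hm, if_neg hn] at h
    have : (Nat.digits 10 n).map Nat.digitChar = ['0'] := by
      rw [← List.reverse_reverse ((Nat.digits 10 n).map Nat.digitChar), ← h]; simp
    have h0 : Nat.digits 10 n = [0] :=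
      map_digitChar_inj _ [0] (fun x hx => Nat.digits_lt_base (by norm_num) hx) (by simp) (by simpa using this)
    have := Nat.ofDigits_digits 10 n
    rw [h0] at this
    simp [Nat.ofDigits] at this
    omega
  · rw [if_neg hm, if_pos hn] at h
    have : (Nat.digits 10 m).map Nat.digitChar = ['0'] := by
      rw [← List.reverse_reverse ((Nat.digits 10 m).map Nat.digitChar), h]; simp
    have h0 : Nat.digits 10 m = [0] :=
      map_digitChar_inj _ [0] (fun x hx => Nat.digits_lt_base (by norm_num) hx) (by simp) (by simpa using this)
    have := Nat.ofDigits_digits 10 m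
    rw [h0] at this
    simp [Nat.ofDigits] at this
    omega
  · rw [if_neg hm, if_neg hn] at h
    have h' : (Nat.digits 10 m).map Nat.digitChar = (Nat.digits 10 n).map Nat.digitChar := by
      rw [← List.reverse_reverse ((Nat.digits 10 m).map Nat.digitChar), h]; simp
    have hd : Nat.digits 10 m = Nat.digits 10 n :=
      map_digitChar_inj _ _ (fun x hx => Nat.digits_lt_base (by norm_num) hx)
        (fun x hx => Nat.digits_lt_base (by norm_num) hx) h'
    have h1 := Nat.ofDigits_digits 10 m
    have h2 := Nat.ofDigits_digits 10 n
    rw [hd] at h1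
    omega

theorem slash_not_mem_toChars (n : Int) : '/' ∉ PySem.Int.toChars n := by
  intro h
  unfold PySem.Int.toChars at h
  have hd : ∀ c ∈ (['0','1','2','3','4','5','6','7','8','9'] : List Char), c ≠ '/' := by
    intro c hc; fin_cases hc <;> simp
  split at h
  · rcases List.mem_cons.mp h with h | h
    · exact absurd h (by decide)
    · exact hd _ (mem_toDigits_digit h) rfl
  · exact hd _ (mem_toDigits_digit h) rfl

theorem toChars_inj {m n : Int} (h : PySem.Int.toChars m = PySem.Int.toChars n) : m = n := by
  unfold PySem.Int.toChars at h
  have hdig : ∀ c ∈ (['0','1','2','3','4','5','6','7','8','9'] : List Char), c ≠ '-' := by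
    intro c hc; fin_cases hc <;> simp
  have hdash : ∀ k : Nat, '-' ∉ Nat.toDigits 10 k := by
    intro k hk
    exact hdig _ (mem_toDigits_digit hk) rfl
  split at h <;> split at h
  case isTrue.isTrue h1 h2 =>
    simp only [List.cons.injEq] at h
    have := toDigits_inj h.2
    omega
  case isTrue.isFalse h1 h2 =>
    exact absurd (h ▸ List.mem_cons_self) (hdash _)
  case isFalse.isTrue h1 h2 =>
    exact absurd (h.symm ▸ List.mem_cons_self) (hdash _)
  case isFalse.isFalse h1 h2 =>
    have := toDigits_inj h
    omega

theorem splitSlash : ∀ (s1 t1 s2 t2 : List Char), '/' ∉ s1 → '/' ∉ t1 →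
    s1 ++ '/' :: s2 = t1 ++ '/' :: t2 → s1 = t1 ∧ s2 = t2 := by
  intro s1
  induction s1 with
  | nil =>
    intro t1 s2 t2 _ h1 h
    cases t1 with
    | nil => simp_all
    | cons c t1' =>
      simp only [List.nil_append, List.cons_append, List.cons.injEq] at h
      exact absurd (h.1 ▸ List.mem_cons_self) h1
  | cons c s1' ih =>
    intro t1 s2 t2 h0 h1 h
    cases t1 with
    | nil =>
      simp only [List.cons_append, List.nil_append, List.cons.injEq] at h
      exact absurd (h.1.symm ▸ List.mem_cons_self) h0
    | cons b t1' =>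
      simp only [List.cons_append, List.cons.injEq] at h
      obtain ⟨rfl, h'⟩ := h
      have := ih t1' s2 t2 (fun hx => h0 (List.mem_cons_of_mem _ hx))
        (fun hx => h1 (List.mem_cons_of_mem _ hx)) h'
      exact ⟨by rw [this.1], this.2⟩

def pvEnc (p : Int × Int) : String := PySem.Int.toStr p.1 ++ "/" ++ PySem.Int.toStr p.2

theorem pvEnc_inj : Function.Injective pvEnc := by
  intro p q h
  unfold pvEnc at h
  have h' : (PySem.Int.toStr p.1 ++ "/" ++ PySem.Int.toStr p.2).toList
      = (PySem.Int.toStr q.1 ++ "/" ++ PySem.Int.toStr q.2).toList := by rw [h]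
  simp only [String.toList_append] at h'
  rw [PySem.Int.toList_toStr, PySem.Int.toList_toStr, PySem.Int.toList_toStr,
    PySem.Int.toList_toStr] at h'
  have hs : PySem.Int.toChars p.1 ++ '/' :: PySem.Int.toChars p.2
      = PySem.Int.toChars q.1 ++ '/' :: PySem.Int.toChars q.2 := by
    simpa using h'
  have := splitSlash _ _ _ _ (slash_not_mem_toChars p.1) (slash_not_mem_toChars q.1) hs
  exact Prod.ext (toChars_inj this.1) (toChars_inj this.2)

def pvLexLE (p q : Int × Int) : Prop := p.1 < q.1 ∨ (p.1 = q.1 ∧ p.2 ≤ q.2)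

theorem pvLexLE_trans {a b c : Int × Int} (h1 : pvLexLE a b) (h2 : pvLexLE b c) : pvLexLE a c := by
  unfold pvLexLE at *; omega

theorem pvLexLE_antisymm {a b : Int × Int} (h1 : pvLexLE a b) (h2 : pvLexLE b a) : a = b := by
  unfold pvLexLE at *
  have : a.1 = b.1 ∧ a.2 = b.2 := by omega
  exact Prod.ext this.1 this.2

theorem insertBy_eq_nil (bf : (Int × Int) → (Int × Int) → Bool) (x : Int × Int) :
    PySem.List.insertBy bf x [] = [x] := rfl

theorem insertBy_eq_cons (bf : (Int × Int) → (Int × Int) → Bool) (x y : Int × Int) (ys : List (Int × Int)) :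
    PySem.List.insertBy bf x (y :: ys) =
      if bf x y then x :: y :: ys else y :: PySem.List.insertBy bf x ys := rfl

theorem insertBy_pairwise (x : Int × Int) (ys : List (Int × Int))
    (h : ys.Pairwise pvLexLE) :
    (PySem.List.insertBy
      (fun a b => decide (a.1 < b.1) || (!decide (b.1 < a.1) && decide (a.2 < b.2))) x ys).Pairwise pvLexLE := by
  induction ys with
  | nil => simp [insertBy_eq_nil]
  | cons y ys ih =>
    rw [insertBy_eq_cons]
    rcases List.pairwise_cons.mp h with ⟨hy, hys⟩
    by_cases hb : (decide (x.1 < y.1) || (!decide (y.1 < x.1) && decide (x.2 < y.2))) = true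
    · rw [if_pos hb]
      simp only [decide_eq_true_eq, Bool.or_eq_true, Bool.and_eq_true, Bool.not_eq_true',
        decide_eq_false_iff_not] at hb
      have hxy : pvLexLE x y := by unfold pvLexLE; omega
      refine List.pairwise_cons.mpr ⟨?_, h⟩
      intro z hz
      rcases List.mem_cons.mp hz with rfl | hz
      · exact hxy
      · exact pvLexLE_trans hxy (hy z hz)
    · rw [if_neg hb]
      simp only [decide_eq_true_eq, Bool.or_eq_true, Bool.and_eq_true, Bool.not_eq_true',
        decide_eq_false_iff_not] at hb
      push Not at hb
      have hyx : pvLexLE y x := by unfold pvLexLE; omega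
      refine List.pairwise_cons.mpr ⟨?_, ih hys⟩
      intro z hz
      rcases (PySem.List.mem_insertBy _ x z ys).mp hz with rfl | hz
      · exact hyx
      · exact hy z hz

theorem sorted2_pairwise_lex (l : List (Int × Int)) :
    (PySem.List.sorted2 l (fun p => p.1) (fun p => p.2) false).Pairwise pvLexLE := by
  unfold PySem.List.sorted2
  simp only [if_neg (by simp : ¬(false = true))]
  have : ∀ (acc : List (Int × Int)), acc.Pairwise pvLexLE →
      (l.foldl (fun acc x => PySem.List.insertBy
        (fun a b => decide (a.1 < b.1) || (!decide (b.1 < a.1) && decide (a.2 < b.2))) x acc) acc).Pairwise pvLexLE := by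
    induction l with
    | nil => intro acc h; exact h
    | cons p l ih =>
      intro acc h
      exact ih _ (insertBy_pairwise p acc h)
  exact this [] List.Pairwise.nil

theorem pvLexLE_refl (p : Int × Int) : pvLexLE p p := by unfold pvLexLE; omega

theorem scan_inv (l : List (Int × Int)) (hl : l.Pairwise pvLexLE) :
    (l = [] ∧ l.foldl pvScanStep (0, 0, none) = (0, 0, none)) ∨
    (∃ best run lv, l.foldl pvScanStep (0, 0, none) = (best, run, some lv) ∧ lv ∈ l ∧
      (∀ w ∈ l, pvLexLE w lv) ∧ run = (l.count lv : Int) ∧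
      (∀ v ∈ l, (l.count v : Int) ≤ best) ∧ (∃ v ∈ l, (l.count v : Int) = best)) := by
  induction l using List.reverseRecOn with
  | nil => left; exact ⟨rfl, rfl⟩
  | append_singleton u p ih =>
    right
    have hu : u.Pairwise pvLexLE := (List.pairwise_append.mp hl).1
    have hup : ∀ w ∈ u, pvLexLE w p := by
      intro w hw
      exact (List.pairwise_append.mp hl).2.2 w hw p (by simp)
    rw [List.foldl_append]
    rcases ih hu with ⟨rfl, hst⟩ | ⟨best, run, lv, hst, hlv, hle, hrun, hbd, hex⟩
    · rw [hst]
      refine ⟨1, 1, p, by simp [pvScanStep], by simp, ?_, by simp, by simp, by simp⟩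
      intro w hw
      simp at hw
      subst hw
      exact pvLexLE_refl _
    · rw [hst]
      by_cases hpl : p = lv
      · subst hpl
        have hstep : pvScanStep (best, run, some p) p =
            (if run + 1 > best then run + 1 else best, run + 1, some p) := by
          simp [pvScanStep]
        have hcnt : ((u ++ [p]).count p : Int) = (u.count p : Int) + 1 := by
          simp [List.count_append]
        have hcnt2 : ∀ v : Int × Int, v ≠ p → (u ++ [p]).count v = u.count v := by
          intro v hv
          rw [List.count_append, show List.count v [p] = 0 from List.count_eq_zero.mpr (by simp [hv])]
          omega
        refine ⟨if run + 1 > best then run + 1 else best, run + 1, p, hstep, by simp, ?_, ?_, ?_, ?_⟩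
        · intro w hw
          rcases List.mem_append.mp hw with hw | hw
          · exact hle w hw
          · simp at hw; subst hw; exact pvLexLE_refl _
        · omega
        · intro v hv
          by_cases hvp : v = p
          · subst hvp
            rw [hcnt, ← hrun]
            split <;> omega
          · rw [hcnt2 v hvp]
            have hvu : v ∈ u := by
              rcases List.mem_append.mp hv with h | h
              · exact h
              · simp at h; exact absurd h hvp
            have := hbd v hvu
            split <;> omega
        · by_cases hgt : run + 1 > best
          · refine ⟨p, by simp, ?_⟩
            rw [hcnt, ← hrun]
            simp [hgt]
          · obtain ⟨v0, hv0, hv0c⟩ := hex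
            have hv0p : v0 ≠ p := by
              intro h
              subst h
              omega
            refine ⟨v0, by simp [List.mem_append, hv0], ?_⟩
            rw [hcnt2 v0 hv0p]
            simp [hgt]
            omega
      · have hpu : p ∉ u := by
          intro hmem
          exact hpl (pvLexLE_antisymm (hle p hmem) (hup lv hlv))
        have hbest1 : (1 : Int) ≤ best := by
          obtain ⟨v0, hv0, hv0c⟩ := hex
          have : 0 < u.count v0 := List.count_pos_iff.mpr hv0
          omega
        have hstep : pvScanStep (best, run, some lv) p = (best, 1, some p) := by
          simp only [pvScanStep]
          rw [if_neg (fun hh => hpl (Option.some.inj hh))]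
          rw [if_neg (by omega)]
        have hcnt : ((u ++ [p]).count p : Int) = 1 := by
          rw [List.count_append, List.count_eq_zero.mpr hpu]
          simp
        have hcnt2 : ∀ v : Int × Int, v ≠ p → (u ++ [p]).count v = u.count v := by
          intro v hv
          rw [List.count_append, show List.count v [p] = 0 from List.count_eq_zero.mpr (by simp [hv])]
          omega
        refine ⟨best, 1, p, hstep, by simp, ?_, by omega, ?_, ?_⟩
        · intro w hw
          rcases List.mem_append.mp hw with hw | hw
          · exact pvLexLE_trans (hle w hw) (hup lv hlv)
          · simp at hw; subst hw; exact pvLexLE_refl _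
        · intro v hv
          by_cases hvp : v = p
          · subst hvp; omega
          · rw [hcnt2 v hvp]
            have hvu : v ∈ u := by
              rcases List.mem_append.mp hv with h | h
              · exact h
              · simp at h; exact absurd h hvp
            exact hbd v hvu
        · obtain ⟨v0, hv0, hv0c⟩ := hex
          have hv0p : v0 ≠ p := fun h => hpu (h ▸ hv0)
          refine ⟨v0, by simp [List.mem_append, hv0], ?_⟩
          rw [hcnt2 v0 hv0p]
          exact hv0c

-- ---------- A's dict loop is a counter over the encoded pairs ----------

theorem dictStep {d : PySem.Dict String Int} {k : String} :
    (if d.contains k then d else d.insert k 0).insert k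
      ((if d.contains k then d else d.insert k 0).getD k 0 + 1) =
    d.insert k (d.getD k 0 + 1) := by
  by_cases hc : d.contains k
  · rw [if_pos hc]
  · rw [if_neg (by simp [hc]), PySem.Dict.getD_insert_self, PySem.Dict.insert_insert_self,
      PySem.Dict.getD_of_not_contains d 0 (by simp [hc])]

theorem keys_eq_strs (X Y : List Int) (hpre : Pre_solution X Y) :
    (PySem.List.pyRange 0 (X.length : Int) 1).map (fun i =>
        pvEnc (PySem.Int.floordiv (PySem.List.pyGetD X i 0)
                 (findGcd (min (PySem.List.pyGetD X i 0) (PySem.List.pyGetD Y i 0))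
                          (max (PySem.List.pyGetD X i 0) (PySem.List.pyGetD Y i 0))),
               PySem.Int.floordiv (PySem.List.pyGetD Y i 0)
                 (findGcd (min (PySem.List.pyGetD X i 0) (PySem.List.pyGetD Y i 0))
                          (max (PySem.List.pyGetD X i 0) (PySem.List.pyGetD Y i 0))))) =
      ((X.zip Y).map (fun q => pvReduce q.1 q.2)).map pvEnc := by
  obtain ⟨hne, hlen, hz⟩ := hpre
  rw [PySem.List.pyRange_one, List.map_map]
  have hto : ((X.length : Int) - 0).toNat = X.length := by omega
  rw [hto]
  have hzlen : (X.zip Y).length = X.length := by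
    rw [List.length_zip]; omega
  apply List.ext_getElem
  · simp [hzlen]
  · intro i h1 h2
    have hiX : i < X.length := by simpa using h1
    have hiY : i < Y.length := by omega
    have hzi : i < (X.zip Y).length := by omega
    simp only [List.getElem_map, List.getElem_range, Function.comp_apply]
    have hg1 : PySem.List.pyGetD X ((0 : Int) + (i : Int)) 0 = X[i] := by
      rw [zero_add, PySem.List.pyGetD_natCast, List.getD_eq_getElem X 0 hiX]
    have hg2 : PySem.List.pyGetD Y ((0 : Int) + (i : Int)) 0 = Y[i] := by
      rw [zero_add, PySem.List.pyGetD_natCast, List.getD_eq_getElem Y 0 hiY]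
    rw [hg1, hg2]
    rw [show ((X.zip Y)[i]) = (X[i], Y[i]) from List.getElem_zip]
    rw [← reduce_agree X[i] Y[i]]

theorem foldl_counter_body (K : Int → String) (l : List Int) :
    l.foldl (fun d i =>
        let frac := K i
        let d1 := if d.contains frac then d else d.insert frac 0
        d1.insert frac (d1.getD frac 0 + 1)) PySem.Dict.empty =
      PySem.Dict.counter (l.map K) := by
  simp only [dictStep]
  calc l.foldl (fun d i => d.insert (K i) (d.getD (K i) 0 + 1)) PySem.Dict.empty
      = (l.map K).foldl (fun (d : PySem.Dict String Int) (k : String) =>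
          d.insert k (d.getD k 0 + 1)) PySem.Dict.empty :=
        (List.foldl_map (f := K) (g := fun (d : PySem.Dict String Int) (k : String) =>
          d.insert k (d.getD k 0 + 1)) (l := l) (init := PySem.Dict.empty)).symm
    _ = PySem.Dict.counter (l.map K) := PySem.Dict.foldl_insert_getD_add_one_eq_counter _

theorem solution_eq_max_counts (X Y : List Int) (hpre : Pre_solution X Y) :
    solution X Y =
      match PySem.List.max?
          ((PySem.Set.ofList (((X.zip Y).map (fun q => pvReduce q.1 q.2)).map pvEnc)).map
            (fun k => ((((X.zip Y).map (fun q => pvReduce q.1 q.2)).map pvEnc).count k : Int)))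
          (fun v => v) with
      | some m => m
      | none => 0 := by
  have hfold :
      (PySem.List.pyRange 0 (X.length : Int) 1).foldl (fun d i =>
        let num := PySem.List.pyGetD X i 0
        let denom := PySem.List.pyGetD Y i 0
        let gcd := findGcd (min num denom) (max num denom)
        let num2 := PySem.Int.floordiv num gcd
        let denom2 := PySem.Int.floordiv denom gcd
        let frac := PySem.Int.toStr num2 ++ "/" ++ PySem.Int.toStr denom2
        let d1 := if d.contains frac then d else d.insert frac 0
        d1.insert frac (d1.getD frac 0 + 1)) PySem.Dict.empty =
      PySem.Dict.counter (((X.zip Y).map (fun q => pvReduce q.1 q.2)).map pvEnc) := by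
    have h1 := foldl_counter_body (fun i =>
        pvEnc (PySem.Int.floordiv (PySem.List.pyGetD X i 0)
                 (findGcd (min (PySem.List.pyGetD X i 0) (PySem.List.pyGetD Y i 0))
                          (max (PySem.List.pyGetD X i 0) (PySem.List.pyGetD Y i 0))),
               PySem.Int.floordiv (PySem.List.pyGetD Y i 0)
                 (findGcd (min (PySem.List.pyGetD X i 0) (PySem.List.pyGetD Y i 0))
                          (max (PySem.List.pyGetD X i 0) (PySem.List.pyGetD Y i 0)))))
      (PySem.List.pyRange 0 (X.length : Int) 1)
    rw [keys_eq_strs X Y hpre] at h1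
    exact h1
  simp only [solution]
  rw [hfold]
  rw [show (PySem.Dict.counter (((X.zip Y).map (fun q => pvReduce q.1 q.2)).map pvEnc)).values
      = (PySem.Set.ofList (((X.zip Y).map (fun q => pvReduce q.1 q.2)).map pvEnc)).map
          (fun k => ((((X.zip Y).map (fun q => pvReduce q.1 q.2)).map pvEnc).count k : Int)) from by
    rw [show ∀ (d : PySem.Dict String Int), d.values = d.items.map (fun p => p.2) from fun d => rfl]
    rw [PySem.Dict.items_counter]
    rw [List.map_map]
    simp [Function.comp_def]]

-- ===== VERDICT (by name: the statement is the Claim_ definition above) =====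
theorem solution_spec : Claim_equal_solution := by
  intro X Y _ hpre
  unfold Spec_solution
  obtain ⟨hne, hlen, hz⟩ := hpre
  have hX0 : 0 < X.length := List.length_pos_of_ne_nil hne
  set pairs := (X.zip Y).map (fun q => pvReduce q.1 q.2) with hpairs
  have hplen : pairs.length = X.length := by
    simp only [hpairs, List.length_map, List.length_zip]; omega
  have hpne : pairs ≠ [] := by
    intro h; rw [h] at hplen; simp at hplen; omega
  set sp := PySem.List.sorted2 pairs (fun p => p.1) (fun p => p.2) with hsp
  have hperm : sp.Perm pairs := PySem.List.sorted2_perm pairs (fun p => p.1) (fun p => p.2) false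
  have hpair := sorted2_pairwise_lex pairs
  rw [← hsp] at hpair
  rcases scan_inv sp hpair with ⟨hnil, _⟩ | ⟨best, run, lv, hst, hlv, hle, hrun, hbd, hex⟩
  · exfalso
    apply hpne
    have := hperm.length_eq
    rw [hnil] at this
    exact List.length_eq_zero_iff.mp this.symm
  · have hAlt : solution_alt X Y = best := by
      simp only [solution_alt]
      rw [← hpairs, ← hsp, hst]
    rw [solution_eq_max_counts X Y ⟨hne, hlen, hz⟩, hAlt, ← hpairs]
    have hcnt : ∀ v : Int × Int, List.count v sp = List.count v pairs :=
      fun v => hperm.count_eq v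
    have hmemb : best ∈ (PySem.Set.ofList (pairs.map pvEnc)).map
        (fun k => ((List.count k (pairs.map pvEnc) : Nat) : Int)) := by
      obtain ⟨v0, hv0, hv0c⟩ := hex
      refine List.mem_map.mpr ⟨pvEnc v0, ?_, ?_⟩
      · exact (PySem.Set.mem_ofList _ _).mpr
          (List.mem_map_of_mem (hperm.mem_iff.mp hv0))
      · rw [List.count_map_of_injective pairs pvEnc pvEnc_inj v0, ← hcnt v0, hv0c]
    have hub : ∀ y ∈ (PySem.Set.ofList (pairs.map pvEnc)).map
        (fun k => ((List.count k (pairs.map pvEnc) : Nat) : Int)), y ≤ best := by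
      intro y hy
      obtain ⟨k, hk, rfl⟩ := List.mem_map.mp hy
      obtain ⟨p0, hp0, rfl⟩ := List.mem_map.mp ((PySem.Set.mem_ofList _ _).mp hk)
      rw [List.count_map_of_injective pairs pvEnc pvEnc_inj p0, ← hcnt p0]
      exact hbd p0 (hperm.mem_iff.mpr hp0)
    cases hmax : PySem.List.max? ((PySem.Set.ofList (pairs.map pvEnc)).map
        (fun k => ((List.count k (pairs.map pvEnc) : Nat) : Int))) (fun v => v) with
    | none =>
      exfalso
      rw [PySem.List.max?_eq_none_iff] at hmax
      rw [hmax] at hmemb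
      exact absurd hmemb (List.not_mem_nil)
    | some m =>
      have h1 : m ≤ best := hub m (PySem.List.max?_mem hmax)
      have h2 : best ≤ m := PySem.List.max?_isMax hmax best hmemb
      simp [le_antisymm h1 h2]
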